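-- pv_equiv track=rewrite | github.com/pypi-data/pypi-mirror-272 | packages/pybib2web/pybib2web-0.6-py3-none-any.whl/pybib2web/categories.py | by_type
-- ===== SOURCE A (Python) =====
-- from collections import defaultdict
-- from typing import Dict, Sequence, Callable, Optional
--
-- ENTRYTYPE_SORT_ORDER = (
--     "book",
--     "proceedings",
--     "article",
--     "incollection",
--     "inproceedings",
--     "techreport",
--     "misc",
--     "invitedtalk",
--     "conferencetalk",
--     "defense",
-- )
--
-- def by_type(entries: Sequence[dict]) -> Dict[str, Sequence[dict]]:
--     """Split the given entries by BibTeX entry type (e.g., inproceedings, article, book).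
--     The returned dictionaries keys are sorted by ENTRYTYPE_SORT_ORDER.
--
--     :param entries: A sequence of BibTeX entries,
--         as returned by :py:meth:`bibtexparser.bibdatabase.BibDatabase.entries`.
--     :return: A dictionary '$type -> $type_entries'.
--         The dictionary maps each type that occurred in the given entries
--         to all entries that are of that type. The dictionary keys are sorted by ENTRYTYPE_SORT_ORDER.
--     """
--     categories = _categorize(entries, _getter("ENTRYTYPE"))
--     sorted_entries = {}
--     assert not (
--         missed_cats := set(categories) - set(ENTRYTYPE_SORT_ORDER)
--     ), f"Categories missed in sort order: {missed_cats}"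
--     # dictionary keys are sorted by insertion order, so add the categories and their entries by the sort order
--     for category in [e for e in ENTRYTYPE_SORT_ORDER if e in categories]:
--         sorted_entries[category] = sort_by_year(categories[category])
--     assert len(sorted_entries) == len(categories)
--     for cat, es in sorted_entries.items():
--         assert len(es) == len(
--             categories[cat]
--         ), f"Inconsistent entries for {cat}: sorted: {len(es)} vs. original: {len(categories[cat])}"
--     return sorted_entries
--
-- def _getter(key):
--     def get(entry):
--         value = entry.get(key, None)
--         if not value:
--             value = []
--         if not isinstance(value, list):
--             value = [value]
--         if len(value) == 1 and value[0] == "":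
--             value = []
--         return value
--
--     return get
--
-- def _categorize(
--     entries: Sequence[dict],
--     get_category: Callable[[dict], Optional[Sequence[str]]],
--     sort_reverse=False,
-- ):
--     categories = defaultdict(list)
--     for entry in entries:
--         categories_of_entry = get_category(entry) or []
--         for cat in categories_of_entry:
--             categories[cat].append(entry)
--     sorted_categories = {}
--     for category in sorted(categories, reverse=sort_reverse):
--         entries = categories[category]
--         sorted_categories[category] = entries
--     return sorted_categories
--
-- def sort_by_year(entries: Sequence[dict]) -> Sequence[dict]:
--     return sorted(entries, key=_getter("year"), reverse=True)
-- ===== SOURCE B (Python) =====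
-- ENTRYTYPE_SORT_ORDER = (
--     "book",
--     "proceedings",
--     "article",
--     "incollection",
--     "inproceedings",
--     "techreport",
--     "misc",
--     "invitedtalk",
--     "conferencetalk",
--     "defense",
-- )
--
-- def by_type(entries):
--     """Group entries by ENTRYTYPE in ENTRYTYPE_SORT_ORDER, each group sorted by year descending."""
--     result = {}
--     for t in ENTRYTYPE_SORT_ORDER:
--         group = [e for e in entries if e.get("ENTRYTYPE") == t]
--         if group:
--             result[t] = sorted(group, key=lambda e: e.get("year") or "", reverse=True)
--     return result
-- ===== Notes on version B (the rewrite author's own statement) =====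
-- stated objective: simpler
-- what changed: Replaced the defaultdict bucketing pass, alphabetical key sort, sort-order reordering and assertion bookkeeping by a single loop over ENTRYTYPE_SORT_ORDER that filters the matching entries and sorts each group by year descending (string key instead of list-of-strings key).
import Mathlib
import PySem

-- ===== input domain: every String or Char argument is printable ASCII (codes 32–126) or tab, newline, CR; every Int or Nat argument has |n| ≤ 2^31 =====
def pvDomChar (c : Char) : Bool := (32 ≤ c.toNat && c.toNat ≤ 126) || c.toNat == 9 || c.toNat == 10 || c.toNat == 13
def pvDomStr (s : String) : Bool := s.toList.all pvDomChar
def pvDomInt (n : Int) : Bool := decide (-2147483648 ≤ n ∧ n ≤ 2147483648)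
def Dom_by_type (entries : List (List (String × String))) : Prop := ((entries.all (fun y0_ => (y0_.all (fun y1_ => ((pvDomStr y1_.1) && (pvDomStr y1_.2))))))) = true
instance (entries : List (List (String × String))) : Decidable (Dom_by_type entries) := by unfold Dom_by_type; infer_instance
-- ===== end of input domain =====

-- B groups by looping over ENTRYTYPE_SORT_ORDER directly (filter + sort per group), replacing A's
-- defaultdict bucketing, alphabetical key sort and reorder-by-sort-order; equal return values on Pre_.

-- ===== PORT A =====
def pvOrder : List String :=
  ["book", "proceedings", "article", "incollection", "inproceedings",
   "techreport", "misc", "invitedtalk", "conferencetalk", "defense"]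

-- _getter(key): strings in the returned Python list are represented by their char lists
def pvGetterA (key : String) (entry : List (String × String)) : List (List Char) :=
  let value : List (List Char) :=
    match entry.lookup key with
    | none => []                                 -- entry.get(key, None) is None (or falsy)
    | some v => if v = "" then [] else [v.toList] -- falsy "" → [], otherwise wrapped in a list
  if value = [[]] then [] else value             -- the `value == [""]` check of _getter

-- _categorize(entries, _getter("ENTRYTYPE")): defaultdict append loop, then keys sorted ascending
def pvCategorize (entries : List (List (String × String))) :
    PySem.Dict (List Char) (List (List (String × String))) :=
  let categories := entries.foldl
    (fun d e => (pvGetterA "ENTRYTYPE" e).foldl (fun d c => d.modify c [] (fun es => es ++ [e])) d)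
    PySem.Dict.empty
  (PySem.List.sorted categories.keys (fun k => k) false).foldl
    (fun d c => d.insert c (categories.getD c [])) PySem.Dict.empty

def pvSortByYear (es : List (List (String × String))) : List (List (String × String)) :=
  PySem.List.sorted es (pvGetterA "year") true

-- the asserts of A raise exactly on the inputs excluded by Pre_by_type and are no-ops inside it
def by_type (entries : List (List (String × String))) :
    List (String × List (List (String × String))) :=
  let categories := pvCategorize entries
  (pvOrder.filter (fun c => categories.contains c.toList)).foldl
    (fun out c => out ++ [(c, pvSortByYear (categories.getD c.toList []))]) []

-- ===== PORT B =====
def by_type_alt (entries : List (List (String × String))) :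
    List (String × List (List (String × String))) :=
  pvOrder.foldl
    (fun out t =>
      let group := entries.filter (fun e => e.lookup "ENTRYTYPE" == some t)
      if group.isEmpty then out
      else out ++ [(t, PySem.List.sorted group (fun e => ((e.lookup "year").getD "").toList) true)])
    []

-- ===== PRECONDITION & SPEC =====
def pvOkEntry (e : List (String × String)) : Bool :=
  match e.lookup "ENTRYTYPE" with
  | none => true
  | some v => v == "" || pvOrder.contains v

-- Pre_ excludes exactly the inputs on which A's assertion raises AssertionError: inputs with an
-- entry whose nonempty ENTRYTYPE value is not in ENTRYTYPE_SORT_ORDER (B returns the grouping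
-- with such entries simply not matching any group).
def Pre_by_type (entries : List (List (String × String))) : Prop :=
  (entries.all pvOkEntry) = true
instance (entries : List (List (String × String))) : Decidable (Pre_by_type entries) := by
  unfold Pre_by_type; infer_instance

def pvWitness_by_type : (List (List (String × String))) :=
  [[("ENTRYTYPE", "article"), ("year", "2020")], [("ENTRYTYPE", "book")]]

def Spec_by_type (entries : List (List (String × String)))
    (out : List (String × List (List (String × String)))) : Prop := out = by_type_alt entries
instance (entries : List (List (String × String)))
    (out : List (String × List (List (String × String)))) : Decidable (Spec_by_type entries out) := by
  unfold Spec_by_type; infer_instance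

-- ===== CLAIM (what is proved, stated in full; the proofs are below) =====
def Claim_equal_by_type : Prop := ∀ (entries : List (List (String × String))),
  Dom_by_type entries → Pre_by_type entries → Spec_by_type entries (by_type entries)

-- ===== LEMMAS AND PROOFS =====

-- (ENTRYTYPE category, entry) occurrence pairs
def pvPairs (entries : List (List (String × String))) : List (List Char × List (String × String)) :=
  entries.flatMap (fun e => (pvGetterA "ENTRYTYPE" e).map (fun c => (c, e)))

lemma pvRaw_eq (entries : List (List (String × String)))
    (d0 : PySem.Dict (List Char) (List (List (String × String)))) :
    entries.foldl
      (fun d e => (pvGetterA "ENTRYTYPE" e).foldl (fun d c => d.modify c [] (fun es => es ++ [e])) d)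
      d0
    = (pvPairs entries).foldl (fun d p => d.modify p.1 [] (fun es => es ++ [p.2])) d0 := by
  induction entries generalizing d0 with
  | nil => simp [pvPairs]
  | cons e rest ih =>
      simp only [pvPairs, List.flatMap_cons, List.foldl_cons, List.foldl_append, List.foldl_map]
      exact ih _

lemma pvGroup_eq (entries : List (List (String × String))) (c : String) (hc : c ≠ "") :
    ((pvPairs entries).filter (fun p => p.1 == c.toList)).map (fun p => p.2)
    = entries.filter (fun e => e.lookup "ENTRYTYPE" == some c) := by
  induction entries with
  | nil => simp [pvPairs]
  | cons e rest ih =>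
      simp only [pvPairs, List.flatMap_cons, List.filter_append, List.map_append] at *
      rw [ih, List.filter_cons]
      cases h : e.lookup "ENTRYTYPE" with
      | none => simp [pvGetterA, h]
      | some v =>
          by_cases hv : v = ""
          · subst hv
            have : (some "" == some c) = false := by
              simp [hc.symm]
            simp [pvGetterA, h, this]
          · have hvl : v.toList ≠ [] := by
              simpa [← String.toList_eq_nil_iff] using hv
            by_cases hvc : v = c
            · subst hvc
              simp [pvGetterA, h, hv, hvl]
            · have h1 : (v.toList == c.toList) = false := by
                simp only [beq_eq_false_iff_ne, ne_eq]
                intro hl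
                exact hvc (String.toList_inj.mp hl)
              have h2 : (some v == some c) = false := by simp [hvc]
              simp [pvGetterA, h, hv, hvl, h1, h2]

lemma pvRawKeys (entries : List (List (String × String))) (c : List Char) :
    c ∈ (entries.foldl
      (fun d e => (pvGetterA "ENTRYTYPE" e).foldl (fun d c => d.modify c [] (fun es => es ++ [e])) d)
      PySem.Dict.empty).keys ↔ c ∈ (pvPairs entries).map (fun p => p.1) := by
  rw [pvRaw_eq]
  rw [PySem.Dict.keys_foldl_modify_key (pvPairs entries) Prod.fst []
        (fun _ p => (fun es => es ++ [p.2])) PySem.Dict.empty]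
  rw [PySem.Dict.keys_empty, PySem.Set.mem_update]
  simp

lemma pvFoldlInsert_get? (ks : List (List Char))
    (f : List Char → List (List (String × String))) (c : List Char) :
    (ks.foldl (fun d k => d.insert k (f k)) PySem.Dict.empty).get? c
    = if c ∈ ks then some (f c) else none := by
  induction ks using List.reverseRecOn with
  | nil => simp [PySem.Dict.get?_empty]
  | append_singleton ks k ih =>
      rw [List.foldl_append]
      simp only [List.foldl_cons, List.foldl_nil]
      by_cases hck : c = k
      · subst hck
        simp [PySem.Dict.get?_insert_self]
      · rw [PySem.Dict.get?_insert_of_ne _ _ hck, ih]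
        simp [hck]

lemma pvBucket_eq (entries : List (List (String × String))) (c : String) (hc : c ≠ "") :
    (pvCategorize entries).getD c.toList []
    = entries.filter (fun e => e.lookup "ENTRYTYPE" == some c) := by
  unfold pvCategorize
  rw [PySem.Dict.getD_eq_get?_getD, pvFoldlInsert_get?]
  simp only [PySem.List.mem_sorted]
  by_cases hm : c.toList ∈ (entries.foldl
      (fun d e => (pvGetterA "ENTRYTYPE" e).foldl (fun d c => d.modify c [] (fun es => es ++ [e])) d)
      PySem.Dict.empty).keys
  · simp only [hm, if_true, Option.getD_some]
    rw [pvRaw_eq, PySem.Dict.getD_foldl_modify_append, PySem.Dict.getD_empty]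
    simpa using pvGroup_eq entries c hc
  · simp only [hm, if_false, Option.getD_none]
    have hnp : (pvPairs entries).filter (fun p => p.1 == c.toList) = [] := by
      rw [List.filter_eq_nil_iff]
      intro p hp hbeq
      exact hm ((pvRawKeys entries c.toList).2
        (List.mem_map.2 ⟨p, hp, (eq_of_beq hbeq).symm ▸ rfl⟩))
    have := pvGroup_eq entries c hc
    rw [hnp] at this
    simpa using this.symm

lemma pvContains_eq (entries : List (List (String × String))) (c : String) (hc : c ≠ "") :
    (pvCategorize entries).contains c.toList
    = !(entries.filter (fun e => e.lookup "ENTRYTYPE" == some c)).isEmpty := by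
  unfold pvCategorize
  rw [PySem.Dict.contains_eq_isSome_get?, pvFoldlInsert_get?]
  simp only [PySem.List.mem_sorted]
  rw [← pvGroup_eq entries c hc]
  by_cases hm : c.toList ∈ (entries.foldl
      (fun d e => (pvGetterA "ENTRYTYPE" e).foldl (fun d c => d.modify c [] (fun es => es ++ [e])) d)
      PySem.Dict.empty).keys
  · simp only [hm, if_true, Option.isSome_some]
    rcases List.mem_map.1 ((pvRawKeys entries c.toList).1 hm) with ⟨p, hp, hpc⟩
    have hmem : p ∈ (pvPairs entries).filter (fun p => p.1 == c.toList) :=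
      List.mem_filter.2 ⟨hp, by simp [hpc]⟩
    have hne : ((pvPairs entries).filter (fun p => p.1 == c.toList)).map (fun p => p.2) ≠ [] := by
      intro h0
      rw [List.map_eq_nil_iff] at h0
      rw [h0] at hmem
      cases hmem
    cases hE : (((pvPairs entries).filter (fun p => p.1 == c.toList)).map (fun p => p.2)).isEmpty
    · rfl
    · exact absurd (List.isEmpty_iff.1 hE) hne
  · simp only [hm, if_false, Option.isSome_none]
    have hnp : (pvPairs entries).filter (fun p => p.1 == c.toList) = [] := by
      rw [List.filter_eq_nil_iff]
      intro p hp hbeq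
      exact hm ((pvRawKeys entries c.toList).2
        (List.mem_map.2 ⟨p, hp, (eq_of_beq hbeq).symm ▸ rfl⟩))
    simp [hnp]

lemma pvSingletonLt (u v : List Char) : (([u] : List (List Char)) < [v]) ↔ u < v := by
  constructor
  · intro h
    cases h with
    | cons h' => exact absurd h' (List.not_lt_nil _)
    | rel h' => exact h'
  · intro h; exact List.Lex.rel h

lemma pvKeyLt (a b : List (String × String)) :
    (pvGetterA "year" a < pvGetterA "year" b)
    ↔ (((a.lookup "year").getD "").toList < ((b.lookup "year").getD "").toList) := by
  have shape : ∀ e : List (String × String),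
      (pvGetterA "year" e = [] ∧ ((e.lookup "year").getD "").toList = [])
      ∨ ∃ v : String, v ≠ "" ∧ pvGetterA "year" e = [v.toList]
          ∧ ((e.lookup "year").getD "").toList = v.toList := by
    intro e
    cases h : e.lookup "year" with
    | none => left; simp [pvGetterA, h]
    | some v =>
        by_cases hv : v = ""
        · left; subst hv; simp [pvGetterA, h]
        · right
          refine ⟨v, hv, ?_, rfl⟩
          have hvl : v.toList ≠ [] := by simpa [← String.toList_eq_nil_iff] using hv
          simp [pvGetterA, h, hv, hvl]
  rcases shape a with ⟨ha1, ha2⟩ | ⟨u, hu, ha1, ha2⟩ <;>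
    rcases shape b with ⟨hb1, hb2⟩ | ⟨v, hv, hb1, hb2⟩ <;>
      rw [ha1, ha2, hb1, hb2]
  · simp
  · have hvl : v.toList ≠ [] := by simpa [← String.toList_eq_nil_iff] using hv
    cases hV : v.toList with
    | nil => exact absurd hV hvl
    | cons x xs =>
        constructor <;> intro _ <;> exact List.Lex.nil
  · simp [List.not_lt_nil]
  · exact pvSingletonLt u.toList v.toList

lemma pvSort_eq (l : List (List (String × String))) :
    pvSortByYear l
    = PySem.List.sorted l (fun e => ((e.lookup "year").getD "").toList) true := by
  unfold pvSortByYear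
  rw [PySem.List.sorted_rev_eq_foldl_insertBy, PySem.List.sorted_rev_eq_foldl_insertBy]
  congr 1
  funext acc x
  congr 1
  funext p q
  exact decide_eq_decide.mpr (pvKeyLt q p)

lemma pvOrder_ne_empty : ∀ c ∈ pvOrder, c ≠ "" := by decide

-- ===== VERDICT (by name: the statement is the Claim_ definition above) =====
theorem by_type_spec : Claim_equal_by_type := by
  intro entries _ _
  unfold Spec_by_type by_type by_type_alt
  -- B as filter + map
  have hB : pvOrder.foldl
      (fun out t =>
        let group := entries.filter (fun e => e.lookup "ENTRYTYPE" == some t)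
        if group.isEmpty then out
        else out ++ [(t, PySem.List.sorted group (fun e => ((e.lookup "year").getD "").toList) true)])
      []
      = (pvOrder.filter
          (fun t => !(entries.filter (fun e => e.lookup "ENTRYTYPE" == some t)).isEmpty)).map
          (fun t => (t, PySem.List.sorted (entries.filter (fun e => e.lookup "ENTRYTYPE" == some t))
            (fun e => ((e.lookup "year").getD "").toList) true)) := by
    rw [show (fun (out : List (String × List (List (String × String)))) (t : String) =>
        let group := entries.filter (fun e => e.lookup "ENTRYTYPE" == some t)
        if group.isEmpty then out
        else out ++ [(t, PySem.List.sorted group (fun e => ((e.lookup "year").getD "").toList) true)])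
      = (fun out t =>
        if (!(entries.filter (fun e => e.lookup "ENTRYTYPE" == some t)).isEmpty) = true
        then out ++ [(t, PySem.List.sorted (entries.filter (fun e => e.lookup "ENTRYTYPE" == some t))
          (fun e => ((e.lookup "year").getD "").toList) true)]
        else out) from by
        funext out t
        cases h : (entries.filter (fun e => e.lookup "ENTRYTYPE" == some t)).isEmpty <;> simp [h]]
    rw [PySem.List.foldl_append_if]
    simp
  rw [hB, PySem.List.foldl_append_singleton_eq_map, List.nil_append]
  rw [List.filter_congr (fun c hcmem => by
    rw [pvContains_eq entries c (pvOrder_ne_empty c hcmem)])]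
  apply List.map_congr_left
  intro c hcf
  have hcmem : c ∈ pvOrder := (List.mem_filter.1 hcf).1
  rw [pvBucket_eq entries c (pvOrder_ne_empty c hcmem), pvSort_eq]
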